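-- pv_equiv track=rewrite | github.com/DrewP1396/displayintel-dashboard | utils/news_scraper.py | extract_products_from_text
-- ===== SOURCE A (Python) =====
-- def extract_products_from_text(text: str) -> str:
--     """Extract mentioned products from article text."""
--     text_lower = text.lower()
--     products = []
--
--     product_map = {
--         'smartphone': 'Smartphone',
--         'mobile': 'Smartphone',
--         'phone': 'Smartphone',
--         'tablet': 'Tablet',
--         'ipad': 'Tablet',
--         'tv': 'TV',
--         'television': 'TV',
--         'monitor': 'Monitor',
--         'laptop': 'IT',
--         'notebook': 'IT',
--         'it panel': 'IT',
--         'automotive': 'Automotive',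
--         'car display': 'Automotive',
--         'vehicle': 'Automotive',
--         'wearable': 'Wearable',
--         'watch': 'Wearable'
--     }
--
--     for keyword, product in product_map.items():
--         if keyword in text_lower and product not in products:
--             products.append(product)
--
--     return ', '.join(products) if products else None
-- ===== SOURCE B (Python) =====
-- def extract_products_from_text(text: str) -> str:
--     """Extract mentioned products from article text."""
--     text_lower = text.lower()
--     groups = [
--         ('Smartphone', ('smartphone', 'mobile', 'phone')),
--         ('Tablet', ('tablet', 'ipad')),
--         ('TV', ('tv', 'television')),
--         ('Monitor', ('monitor',)),
--         ('IT', ('laptop', 'notebook', 'it panel')),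
--         ('Automotive', ('automotive', 'car display', 'vehicle')),
--         ('Wearable', ('wearable', 'watch')),
--     ]
--     labels = [label for label, kws in groups
--               if any(kw in text_lower for kw in kws)]
--     return ', '.join(labels) if labels else None
-- ===== Notes on version B (the rewrite author's own statement) =====
-- stated objective: simpler
-- what changed: B groups the keywords by label into an ordered (label, keywords) list and emits each label at most once via a single any() test per group, removing A's per-keyword loop and its membership dedup scan over the accumulated labels.
import Mathlib
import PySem

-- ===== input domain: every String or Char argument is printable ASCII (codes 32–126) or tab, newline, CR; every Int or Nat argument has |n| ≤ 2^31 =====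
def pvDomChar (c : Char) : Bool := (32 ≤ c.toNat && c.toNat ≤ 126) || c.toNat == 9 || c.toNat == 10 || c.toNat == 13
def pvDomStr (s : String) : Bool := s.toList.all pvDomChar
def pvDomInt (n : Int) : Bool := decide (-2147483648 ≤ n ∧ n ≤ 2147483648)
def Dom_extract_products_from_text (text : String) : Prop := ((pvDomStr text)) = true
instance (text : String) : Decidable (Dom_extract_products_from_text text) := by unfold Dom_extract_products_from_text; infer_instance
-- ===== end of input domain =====

-- B replaces A's per-keyword loop with its 'product not in products' dedup scan by an
-- ordered (label, keywords) group list with one any() test per label (objective: simpler).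

-- ===== PORT A =====
-- A's dict literal, in insertion order (keyword, product)
def pvProductMap : List (String × String) :=
  [("smartphone", "Smartphone"), ("mobile", "Smartphone"), ("phone", "Smartphone"),
   ("tablet", "Tablet"), ("ipad", "Tablet"),
   ("tv", "TV"), ("television", "TV"),
   ("monitor", "Monitor"),
   ("laptop", "IT"), ("notebook", "IT"), ("it panel", "IT"),
   ("automotive", "Automotive"), ("car display", "Automotive"), ("vehicle", "Automotive"),
   ("wearable", "Wearable"), ("watch", "Wearable")]

-- the body of A's for-loop
def pvStep (text_lower : String) (products : List String) (kp : String × String) : List String :=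
  if PySem.Str.isIn kp.1 text_lower && !(products.contains kp.2) then products ++ [kp.2]
  else products

def extract_products_from_text (text : String) : Option String :=
  let text_lower := PySem.Str.lower text
  let products : List String := pvProductMap.foldl (pvStep text_lower) []
  if products ≠ [] then some (PySem.Str.join ", " products) else none

-- ===== PORT B =====
def pvGroups : List (String × List String) :=
  [("Smartphone", ["smartphone", "mobile", "phone"]),
   ("Tablet", ["tablet", "ipad"]),
   ("TV", ["tv", "television"]),
   ("Monitor", ["monitor"]),
   ("IT", ["laptop", "notebook", "it panel"]),
   ("Automotive", ["automotive", "car display", "vehicle"]),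
   ("Wearable", ["wearable", "watch"])]

def extract_products_from_text_alt (text : String) : Option String :=
  let text_lower := PySem.Str.lower text
  let labels : List String :=
    (pvGroups.filter (fun g => g.2.any (fun kw => PySem.Str.isIn kw text_lower))).map (·.1)
  if labels ≠ [] then some (PySem.Str.join ", " labels) else none

-- ===== PRECONDITION & SPEC =====
def Spec_extract_products_from_text (text : String) (out : Option String) : Prop := out = extract_products_from_text_alt text
instance (text : String) (out : Option String) : Decidable (Spec_extract_products_from_text text out) := by unfold Spec_extract_products_from_text; infer_instance

-- ===== CLAIM (what is proved, stated in full; the proofs are below) =====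
def Claim_equal_extract_products_from_text : Prop := ∀ (text : String), Dom_extract_products_from_text text → Spec_extract_products_from_text text (extract_products_from_text text)

-- ===== LEMMAS AND PROOFS =====

-- the one-label segment both loops contribute for a group
def pvSeg (b : Bool) (l : String) : List String := if b then [l] else []

-- A's loop body with the keyword test abstracted to an arbitrary predicate p
def pvStepP (p : String → Bool) (products : List String) (kp : String × String) : List String :=
  if p kp.1 && !(products.contains kp.2) then products ++ [kp.2] else products

theorem pvStep_eq (tl : String) : pvStep tl = pvStepP (fun k => PySem.Str.isIn k tl) := rfl

theorem pv_mem_seg_iff (x l : String) (b : Bool) : x ∈ pvSeg b l ↔ (b = true ∧ x = l) := by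
  cases b <;> simp [pvSeg]

-- folding A's step over keywords that all map to label L is a no-op once L is in products
theorem pvFold_mem (p : String → Bool) (L : String) (ks ps : List String) (h : L ∈ ps) :
    (ks.map (fun k => (k, L))).foldl (pvStepP p) ps = ps := by
  have hc : ps.contains L = true := by simpa using h
  induction ks with
  | nil => rfl
  | cons k ks ih => simpa [pvStepP, h] using ih

-- folding A's step over one label's keyword group appends that label iff any keyword matches
theorem pvFold_group (p : String → Bool) (L : String) (ks ps : List String) (h : L ∉ ps) :
    (ks.map (fun k => (k, L))).foldl (pvStepP p) ps = ps ++ pvSeg (ks.any p) L := by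
  induction ks generalizing ps with
  | nil => simp [pvSeg]
  | cons k ks ih =>
    have hcont : ps.contains L = false := by simpa using h
    by_cases hc : p k = true
    · rw [List.map_cons, List.foldl_cons,
        show pvStepP p ps (k, L) = ps ++ [L] from by simp [pvStepP, hc, h],
        pvFold_mem p L ks (ps ++ [L]) (by simp)]
      simp [pvSeg, hc]
    · rw [List.map_cons, List.foldl_cons,
        show pvStepP p ps (k, L) = ps from by simp [pvStepP, hc],
        ih ps h]
      simp [pvSeg, hc]

-- A's products list, as the concatenation of the seven label segments
theorem pvA_products (p : String → Bool) :
    pvProductMap.foldl (pvStepP p) []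
      = pvSeg (["smartphone", "mobile", "phone"].any p) "Smartphone"
        ++ pvSeg (["tablet", "ipad"].any p) "Tablet"
        ++ pvSeg (["tv", "television"].any p) "TV"
        ++ pvSeg (["monitor"].any p) "Monitor"
        ++ pvSeg (["laptop", "notebook", "it panel"].any p) "IT"
        ++ pvSeg (["automotive", "car display", "vehicle"].any p) "Automotive"
        ++ pvSeg (["wearable", "watch"].any p) "Wearable" := by
  have hsplit : pvProductMap
      = (["smartphone", "mobile", "phone"].map (fun k => (k, "Smartphone")))
        ++ (["tablet", "ipad"].map (fun k => (k, "Tablet")))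
        ++ (["tv", "television"].map (fun k => (k, "TV")))
        ++ (["monitor"].map (fun k => (k, "Monitor")))
        ++ (["laptop", "notebook", "it panel"].map (fun k => (k, "IT")))
        ++ (["automotive", "car display", "vehicle"].map (fun k => (k, "Automotive")))
        ++ (["wearable", "watch"].map (fun k => (k, "Wearable"))) := by simp [pvProductMap]
  rw [hsplit, List.foldl_append, List.foldl_append, List.foldl_append, List.foldl_append,
    List.foldl_append, List.foldl_append]
  rw [pvFold_group p "Smartphone" _ [] (by simp)]
  rw [pvFold_group p "Tablet" _ _ (by simp [pv_mem_seg_iff])]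
  rw [pvFold_group p "TV" _ _ (by simp [pv_mem_seg_iff])]
  rw [pvFold_group p "Monitor" _ _ (by simp [pv_mem_seg_iff])]
  rw [pvFold_group p "IT" _ _ (by simp [pv_mem_seg_iff])]
  rw [pvFold_group p "Automotive" _ _ (by simp [pv_mem_seg_iff])]
  rw [pvFold_group p "Wearable" _ _ (by simp [pv_mem_seg_iff])]
  simp

-- one step of B's filter-then-project comprehension
theorem pv_cons (q : (String × List String) → Bool) (g : String × List String)
    (gs : List (String × List String)) :
    ((g :: gs).filter q).map (·.1) = pvSeg (q g) g.1 ++ (gs.filter q).map (·.1) := by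
  cases h : q g <;> simp [pvSeg, h]

-- B's labels list, as the same concatenation of segments
theorem pvB_labels (p : String → Bool) :
    (pvGroups.filter (fun g => g.2.any p)).map (·.1)
      = pvSeg (["smartphone", "mobile", "phone"].any p) "Smartphone"
        ++ pvSeg (["tablet", "ipad"].any p) "Tablet"
        ++ pvSeg (["tv", "television"].any p) "TV"
        ++ pvSeg (["monitor"].any p) "Monitor"
        ++ pvSeg (["laptop", "notebook", "it panel"].any p) "IT"
        ++ pvSeg (["automotive", "car display", "vehicle"].any p) "Automotive"
        ++ pvSeg (["wearable", "watch"].any p) "Wearable" := by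
  show ((pvGroups.filter (fun g => g.2.any p)).map (·.1)) = _
  rw [show pvGroups = ("Smartphone", ["smartphone", "mobile", "phone"]) :: ("Tablet", ["tablet", "ipad"]) :: ("TV", ["tv", "television"]) :: ("Monitor", ["monitor"]) :: ("IT", ["laptop", "notebook", "it panel"]) :: ("Automotive", ["automotive", "car display", "vehicle"]) :: [("Wearable", ["wearable", "watch"])] from rfl]
  rw [pv_cons, pv_cons, pv_cons, pv_cons, pv_cons, pv_cons, pv_cons]
  simp

-- ===== VERDICT (by name: the statement is the Claim_ definition above) =====
theorem extract_products_from_text_spec : Claim_equal_extract_products_from_text := by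
  intro text _
  unfold Spec_extract_products_from_text extract_products_from_text extract_products_from_text_alt
  simp only [pvStep_eq, pvA_products, pvB_labels]
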